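-- pv_equiv track=rewrite | github.com/Rickyy-Sam07/Bengali_QA | build_bengali_qa_dataset.py | group_chunks
-- ===== SOURCE A (Python) =====
-- from typing import Dict, List, Optional, Tuple
--
-- def group_chunks(chunks: List[str], group_size: int, stride: int) -> List[List[str]]:
--     if not chunks:
--         return []
--
--     gsize = max(1, group_size)
--     step = max(1, stride)
--     groups: List[List[str]] = []
--
--     i = 0
--     while i < len(chunks):
--         group = chunks[i : i + gsize]
--         if not group:
--             break
--         groups.append(group)
--         if i + gsize >= len(chunks):
--             break
--         i += step
--
--     return groups
-- ===== SOURCE B (Python) =====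
-- def group_chunks(chunks, group_size, stride):
--     if not chunks:
--         return []
--     gsize = max(1, group_size)
--     step = max(1, stride)
--     n = len(chunks)
--     # index of the last window: the first start whose window reaches the end of
--     # the list, clamped to the last start that still lies inside the list
--     last = min(max(0, (n - gsize + step - 1) // step), (n - 1) // step)
--     return [chunks[i:i + gsize] for i in range(0, last * step + 1, step)]
-- ===== Notes on version B (the rewrite author's own statement) =====
-- stated objective: alternative
-- what changed: Replaces A's stateful while/break loop by a closed-form computation of the last window's start index (the first start whose window reaches the end of the list, clamped to the last start inside the list) followed by a single range-driven slicing comprehension.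
import Mathlib
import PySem

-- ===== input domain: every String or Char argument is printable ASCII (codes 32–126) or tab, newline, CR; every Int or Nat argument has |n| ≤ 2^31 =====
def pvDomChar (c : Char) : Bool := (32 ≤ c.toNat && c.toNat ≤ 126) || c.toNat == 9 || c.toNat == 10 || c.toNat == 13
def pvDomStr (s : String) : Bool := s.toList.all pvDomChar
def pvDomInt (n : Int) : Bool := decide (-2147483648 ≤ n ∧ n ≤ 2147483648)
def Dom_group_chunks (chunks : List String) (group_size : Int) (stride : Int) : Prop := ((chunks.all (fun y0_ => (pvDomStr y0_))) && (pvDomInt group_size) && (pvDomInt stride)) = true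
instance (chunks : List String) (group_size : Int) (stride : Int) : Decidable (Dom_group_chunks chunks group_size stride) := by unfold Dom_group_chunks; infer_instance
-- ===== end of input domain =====

-- B replaces A's stateful while/break loop by a closed-form index of the last window
-- plus one range-driven slicing pass (alternative decomposition, same asymptotic cost).

-- ===== PORT A =====
-- needed by groupsLoopA's termination argument (cited in the port)
theorem pv_max_toNat_pos (x : Int) : 0 < (max 1 x).toNat := by
  have h : (1 : Int) ≤ max 1 x := le_max_left _ _
  omega

-- the while loop of A: i is the current start index (always a natural number in A,
-- since it starts at 0 and grows by step ≥ 1)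
def groupsLoopA (chunks : List String) (gsize step : Nat) (hstep : 0 < step) (i : Nat) :
    List (List String) :=
  if h : i < chunks.length then
    let group := PySem.List.slice chunks (some (i : Int)) (some ((i : Int) + (gsize : Int)))
    if group = [] then []
    else
      group ::
        (if chunks.length ≤ i + gsize then []
         else groupsLoopA chunks gsize step hstep (i + step))
  else []
termination_by chunks.length - i
decreasing_by omega

def group_chunks (chunks : List String) (group_size : Int) (stride : Int) :
    List (List String) :=
  if chunks = [] then []
  else
    groupsLoopA chunks (max 1 group_size).toNat (max 1 stride).toNat
      (pv_max_toNat_pos stride) 0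

-- ===== PORT B =====
def group_chunks_alt (chunks : List String) (group_size : Int) (stride : Int) :
    List (List String) :=
  if chunks = [] then []
  else
    let gsize : Int := max 1 group_size
    let step : Int := max 1 stride
    let n : Int := (chunks.length : Int)
    -- index of the last window: the first start whose window reaches the end of
    -- the list, clamped to the last start that still lies inside the list
    let last : Int :=
      min (max 0 (PySem.Int.floordiv (n - gsize + step - 1) step))
          (PySem.Int.floordiv (n - 1) step)
    (PySem.List.pyRange 0 (last * step + 1) step).map
      (fun i => PySem.List.slice chunks (some i) (some (i + gsize)))

-- ===== PRECONDITION & SPEC =====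
def Spec_group_chunks (chunks : List String) (group_size : Int) (stride : Int) (out : List (List String)) : Prop := out = group_chunks_alt chunks group_size stride
instance (chunks : List String) (group_size : Int) (stride : Int) (out : List (List String)) : Decidable (Spec_group_chunks chunks group_size stride out) := by unfold Spec_group_chunks; infer_instance

-- ===== CLAIM (what is proved, stated in full; the proofs are below) =====
def Claim_equal_group_chunks : Prop := ∀ (chunks : List String) (group_size : Int) (stride : Int), Dom_group_chunks chunks group_size stride → Spec_group_chunks chunks group_size stride (group_chunks chunks group_size stride)

-- ===== LEMMAS AND PROOFS =====

-- A's loop, started at i, produces exactly the K+1 windows at starts i, i+s, …, i+K·s,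
-- provided K is the index of the last window the loop emits.
theorem loopA_eq (chunks : List String) (g s : Nat) (hs : 0 < s) (hg : 0 < g) :
    ∀ (K i : Nat), i + K * s < chunks.length →
      (∀ j, j < K → i + j * s + g < chunks.length) →
      (chunks.length ≤ i + K * s + g ∨ chunks.length ≤ i + (K + 1) * s) →
      groupsLoopA chunks g s hs i =
        (List.range (K + 1)).map (fun j => (chunks.drop (i + j * s)).take g) := by
  intro K
  induction K with
  | zero =>
    intro i hlt _ hstop
    have hi : i < chunks.length := by omega
    have hne : (chunks.drop i).take g ≠ [] := by
      intro h
      have hl : ((chunks.drop i).take g).length = 0 := by rw [h]; rfl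
      simp [List.length_take, List.length_drop] at hl
      omega
    rw [groupsLoopA]
    simp only [hi, dif_pos, PySem.List.slice_natCast_add, if_neg hne]
    by_cases hend : chunks.length ≤ i + g
    · simp [hend]
    · have hnext : chunks.length ≤ i + s := by omega
      rw [groupsLoopA]
      simp [hend, Nat.not_lt.mpr hnext]
  | succ K ih =>
    intro i hlt hall hstop
    have hi : i < chunks.length := by
      have := hlt; omega
    have h0 : i + g < chunks.length := by
      have := hall 0 (by omega); simpa using this
    have hne : (chunks.drop i).take g ≠ [] := by
      intro h
      have hl : ((chunks.drop i).take g).length = 0 := by rw [h]; rfl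
      simp [List.length_take, List.length_drop] at hl
      omega
    rw [groupsLoopA]
    simp only [hi, dif_pos, PySem.List.slice_natCast_add, if_neg hne,
      if_neg (by omega : ¬ chunks.length ≤ i + g)]
    have hrec := ih (i + s)
      (by simp only [Nat.add_mul, Nat.one_mul] at hlt; omega)
      (by intro j hj
          have := hall (j + 1) (by omega)
          simp only [Nat.add_mul, Nat.one_mul] at this; omega)
      (by rcases hstop with h | h
          · left; simp only [Nat.add_mul, Nat.one_mul] at h; omega
          · right; simp only [Nat.add_mul, Nat.one_mul] at h ⊢; omega)
    rw [hrec]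
    rw [List.range_succ_eq_map (n := K + 1), List.map_cons, List.map_map]
    congr 1
    · simp
    · apply List.map_congr_left
      intro j _
      have : i + s + j * s = i + Nat.succ j * s := by rw [Nat.succ_mul]; omega
      simp [Function.comp, this]

theorem group_chunks_spec_aux (chunks : List String) (group_size stride : Int)
    (hne : chunks ≠ []) :
    group_chunks chunks group_size stride = group_chunks_alt chunks group_size stride := by
  set g : Nat := (max 1 group_size).toNat with hgdef
  set s : Nat := (max 1 stride).toNat with hsdef
  have hg : 0 < g := pv_max_toNat_pos group_size
  have hs : 0 < s := pv_max_toNat_pos stride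
  have hgi : ((g : Nat) : Int) = max 1 group_size := by
    rw [hgdef, Int.toNat_of_nonneg (by have := le_max_left (1:Int) group_size; omega)]
  have hsi : ((s : Nat) : Int) = max 1 stride := by
    rw [hsdef, Int.toNat_of_nonneg (by have := le_max_left (1:Int) stride; omega)]
  have hn : 0 < chunks.length := List.length_pos_iff.mpr hne
  set n : Nat := chunks.length with hndef
  have hsipos : (0 : Int) < max 1 stride := by omega
  have hgipos : (0 : Int) < max 1 group_size + 0 := by
    have := le_max_left (1:Int) group_size; omega
  -- the Int-level quantities computed by B
  set c : Int := PySem.Int.floordiv ((n : Int) - max 1 group_size + max 1 stride - 1)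
      (max 1 stride) with hcdef
  set jm : Int := PySem.Int.floordiv ((n : Int) - 1) (max 1 stride) with hjmdef
  set k : Int := min (max 0 c) jm with hkdef
  obtain ⟨hc1, hc2⟩ := (PySem.Int.floordiv_eq_iff_of_pos hsipos).mp hcdef.symm
  obtain ⟨hjm1, hjm2⟩ := (PySem.Int.floordiv_eq_iff_of_pos hsipos).mp hjmdef.symm
  have hjmnn : 0 ≤ jm := by
    by_contra hcon
    push_neg at hcon
    have : (jm + 1) * max 1 stride ≤ 0 * max 1 stride :=
      mul_le_mul_of_nonneg_right (by omega) (by omega)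
    simp at this
    omega
  have hknonneg : 0 ≤ k := by
    rw [hkdef]; exact le_min (le_max_left _ _) hjmnn
  set K : Nat := k.toNat with hKdef
  have hKi : ((K : Nat) : Int) = k := Int.toNat_of_nonneg hknonneg
  -- the three loop conditions at i = 0
  have hmain : K * s < n ∧ (∀ j, j < K → j * s + g < n) ∧
      (n ≤ K * s + g ∨ n ≤ (K + 1) * s) := by
    refine ⟨?_, ?_, ?_⟩
    · -- K*s < n : k ≤ jm and jm*step ≤ n-1
      have hkjm : k ≤ jm := min_le_right _ _
      have h1 : k * max 1 stride ≤ jm * max 1 stride :=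
        mul_le_mul_of_nonneg_right hkjm (by omega)
      have h2 : ((K : Nat) : Int) * ((s : Nat) : Int) < (n : Int) := by
        rw [hKi, hsi]; omega
      exact_mod_cast (by push_cast at h2 ⊢; omega : ((K * s : Nat) : Int) < ((n : Nat) : Int))
    · -- every earlier window ends strictly inside the list
      intro j hj
      have hjk : (j : Int) < k := by
        rw [← hKi]; exact_mod_cast hj
      have hkc : k ≤ max 0 c := min_le_left _ _
      have hcpos : max 0 c = c := by
        have : (0 : Int) < max 0 c := by omega
        omega
      have hjc : (j : Int) ≤ c - 1 := by omega
      have h1 : (j : Int) * max 1 stride ≤ (c - 1) * max 1 stride :=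
        mul_le_mul_of_nonneg_right hjc (by omega)
      have hce : (c - 1) * max 1 stride = c * max 1 stride - max 1 stride := by ring
      have h2 : (j : Int) * ((s : Nat) : Int) + ((g : Nat) : Int) < (n : Int) := by
        rw [hsi, hgi]; omega
      exact_mod_cast (by push_cast at h2 ⊢; omega :
        ((j * s + g : Nat) : Int) < ((n : Nat) : Int))
    · -- the last emitted window either reaches the end or the next start is outside
      by_cases hcase : max 0 c ≤ jm
      · left
        have hkval : k = max 0 c := by rw [hkdef, min_eq_left hcase]
        by_cases hcpos : 0 < c
        · have hk : k = c := by omega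
          have hce : (c + 1) * max 1 stride = c * max 1 stride + max 1 stride := by ring
          have h2 : (n : Int) ≤ ((K : Nat) : Int) * ((s : Nat) : Int) + ((g : Nat) : Int) := by
            rw [hKi, hk, hsi, hgi]; omega
          exact_mod_cast (by push_cast at h2 ⊢; omega :
            ((n : Nat) : Int) ≤ ((K * s + g : Nat) : Int))
        · have hk : k = 0 := by omega
          have hle : (c + 1) * max 1 stride ≤ 1 * max 1 stride :=
            mul_le_mul_of_nonneg_right (by omega) (by omega)
          simp only [one_mul] at hle
          have h2 : (n : Int) ≤ ((K : Nat) : Int) * ((s : Nat) : Int) + ((g : Nat) : Int) := by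
            rw [hKi, hk, hsi, hgi]; omega
          exact_mod_cast (by push_cast at h2 ⊢; omega :
            ((n : Nat) : Int) ≤ ((K * s + g : Nat) : Int))
      · right
        have hkval : k = jm := by rw [hkdef, min_eq_right (by omega)]
        have hce : (jm + 1) * max 1 stride = jm * max 1 stride + max 1 stride := by ring
        have h2 : (n : Int) ≤ (((K : Nat) : Int) + 1) * ((s : Nat) : Int) := by
          rw [hKi, hkval, hsi]; omega
        exact_mod_cast (by push_cast at h2 ⊢; omega :
          ((n : Nat) : Int) ≤ (((K + 1) * s : Nat) : Int))
  obtain ⟨hc', ha', hb'⟩ := hmain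
  -- evaluate A
  have hA : group_chunks chunks group_size stride =
      (List.range (K + 1)).map (fun j => (chunks.drop (j * s)).take g) := by
    rw [group_chunks, if_neg hne]
    have := loopA_eq chunks g s hs hg K 0 (by omega)
      (by intro j hj; have := ha' j hj; omega) (by omega)
    rw [this]
    simp
  -- evaluate B
  have hB : group_chunks_alt chunks group_size stride =
      (List.range (K + 1)).map (fun j => (chunks.drop (j * s)).take g) := by
    rw [group_chunks_alt, if_neg hne]
    simp only
    rw [← hcdef, ← hjmdef, ← hkdef]
    rw [PySem.List.pyRange_of_pos _ _ hsipos]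
    have hcount : (if (0 : Int) < k * max 1 stride + 1
        then ((k * max 1 stride + 1 - 0 + max 1 stride - 1) / max 1 stride).toNat else 0) = K + 1 := by
      rw [if_pos (by nlinarith)]
      have h1 : k * max 1 stride + 1 - 0 + max 1 stride - 1 = (k + 1) * max 1 stride := by ring
      rw [h1, Int.mul_ediv_cancel _ (by omega)]
      omega
    rw [hcount, List.map_map]
    apply List.map_congr_left
    intro j hj
    have hjv : (0 : Int) + max 1 stride * (j : Int) = ((j * s : Nat) : Int) := by
      push_cast [hsi]; ring
    simp only [Function.comp_apply]
    rw [hjv, ← hgi, PySem.List.slice_natCast_add]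
  rw [hA, hB]

-- ===== VERDICT (by name: the statement is the Claim_ definition above) =====
theorem group_chunks_spec : Claim_equal_group_chunks := by
  intro chunks group_size stride _
  unfold Spec_group_chunks
  by_cases hne : chunks = []
  · subst hne; rfl
  · exact group_chunks_spec_aux chunks group_size stride hne
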